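-- pv_equiv track=rewrite | github.com/akojedefemi/Comment-Counter | quote_check.py | quote_check
-- ===== SOURCE A (Python) =====
-- def quote_check(line, c_comment):
--     quote_char = chr(34)    # Set quote_char to '"'
--     in_quote = False    # True when within a quote
--     comment_seen = False    # True when Target char found and not within quote
--
--     for ch in line:
--         if in_quote is False and ch == c_comment:
--             comment_seen = True
--         if ch == quote_char:
--             in_quote = not in_quote
--
--     return comment_seen
-- ===== SOURCE B (Python) =====
-- def quote_check(line, c_comment):
--     # A character-level comparison: a multi-character c_comment can never equal a single char.
--     if len(c_comment) != 1:
--         return False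
--     parts = line.split('"')
--     if c_comment == '"':
--         # every opening quote is itself outside the quoted region
--         return len(parts) > 1
--     # segments at even indices lie outside double quotes
--     return any(c_comment in part for part in parts[0::2])
-- ===== Notes on version B (the rewrite author's own statement) =====
-- stated objective: faster
-- what changed: Replaces the char-by-char in_quote toggle scan with a split-on-'"' decomposition: a length-1 guard, a direct quote-presence answer when c_comment is the quote char itself, and a substring test over the even-indexed (outside-quotes) segments.
import Mathlib
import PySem

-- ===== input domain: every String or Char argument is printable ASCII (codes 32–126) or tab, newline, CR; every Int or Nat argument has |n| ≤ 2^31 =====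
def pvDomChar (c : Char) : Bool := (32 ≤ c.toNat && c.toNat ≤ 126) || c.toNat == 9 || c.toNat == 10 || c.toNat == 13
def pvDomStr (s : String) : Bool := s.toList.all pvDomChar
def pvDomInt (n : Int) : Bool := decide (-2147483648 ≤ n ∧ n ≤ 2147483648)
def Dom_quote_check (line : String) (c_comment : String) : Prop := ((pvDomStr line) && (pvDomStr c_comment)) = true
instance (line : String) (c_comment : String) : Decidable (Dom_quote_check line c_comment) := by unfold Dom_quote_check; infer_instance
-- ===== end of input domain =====

-- ===== PORT A =====
-- B replaces A's char-by-char quote-toggle scan with a split-on-'"' decomposition; equal return value everywhere (no side effects).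
def quote_check (line : String) (c_comment : String) : Bool :=
  -- literal port of A: for ch in line, flag c_comment seen outside quotes, toggle on '"'
  (line.toList.foldl
    (fun (st : Bool × Bool) ch =>
      let comment_seen := if st.1 == false && String.ofList [ch] == c_comment then true else st.2
      let in_quote := if ch == Char.ofNat 34 then !st.1 else st.1
      (in_quote, comment_seen))
    (false, false)).2

-- ===== PORT B =====
def quote_check_alt (line : String) (c_comment : String) : Bool :=
  if PySem.Str.len c_comment != 1 then false
  else
    let parts := PySem.Chars.splitOn line.toList ['"']
    if c_comment == "\"" then decide (1 < parts.length)
    else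
      -- parts[0::2] : extended slice, step 2 is never 0 so slice? is some
      ((PySem.List.slice? parts (some 0) none 2).getD []).any
        (fun part => PySem.Chars.isIn c_comment.toList part)

-- ===== PRECONDITION & SPEC =====
def Spec_quote_check (line : String) (c_comment : String) (out : Bool) : Prop := out = quote_check_alt line c_comment
instance (line : String) (c_comment : String) (out : Bool) : Decidable (Spec_quote_check line c_comment out) := by unfold Spec_quote_check; infer_instance

-- ===== CLAIM (what is proved, stated in full; the proofs are below) =====
def Claim_equal_quote_check : Prop := ∀ (line : String) (c_comment : String), Dom_quote_check line c_comment → Spec_quote_check line c_comment (quote_check line c_comment)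

-- ===== LEMMAS AND PROOFS =====

-- chars A inspects while in_quote is false (opening quotes included)
def pvOuts : Bool → List Char → List Char
  | _, [] => []
  | iq, c :: cs => (if iq then [] else [c]) ++ pvOuts (if c == '"' then !iq else iq) cs

-- single-character split on '"' (specification of PySem.Chars.splitOn for this separator)
def pvSplitQ : List Char → List (List Char)
  | [] => [[]]
  | c :: cs => if c = '"' then [] :: pvSplitQ cs else (pvSplitQ cs).modifyHead (c :: ·)

-- characters outside quotes, reconstructed from the split segments
def pvRecon : Bool → List (List Char) → List Char
  | _, [] => []
  | iq, s :: rest =>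
      (if iq then [] else s) ++
      (if rest.isEmpty then [] else (if iq then [] else ['"']) ++ pvRecon (!iq) rest)

-- alternating selection: pvAltern true = elements at even indices
def pvAltern {X : Type} : Bool → List X → List X
  | _, [] => []
  | b, x :: t => (if b then [x] else []) ++ pvAltern (!b) t

lemma pv_strBeq (ch : Char) (c : String) : (String.ofList [ch] == c) = (c.toList == [ch]) := by
  rcases eq_or_ne (String.ofList [ch]) c with h | h
  · subst h; simp
  · have h2 : c.toList ≠ [ch] := fun hl => h (String.toList_inj.mp (by simp [hl]))
    simp [h, h2]

lemma pv_foldA (c : String) : ∀ (cs : List Char) (iq csn : Bool),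
    (cs.foldl
      (fun (st : Bool × Bool) ch =>
        let comment_seen := if st.1 == false && String.ofList [ch] == c then true else st.2
        let in_quote := if ch == Char.ofNat 34 then !st.1 else st.1
        (in_quote, comment_seen))
      (iq, csn)).2
    = (csn || (pvOuts iq cs).any (fun ch => c.toList == [ch])) := by
  intro cs
  induction cs with
  | nil => intro iq csn; simp [pvOuts]
  | cons ch cs ih =>
    intro iq csn
    simp only [List.foldl_cons, pvOuts, List.any_append]
    rw [ih]
    rw [pv_strBeq ch c]
    by_cases hP : c.toList = [ch] <;> by_cases hq : ch = Char.ofNat 34 <;>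
      cases iq <;> cases csn <;> simp [hP, hq, beq_eq_decide]

lemma pv_splitQ_ne_nil : ∀ (cs : List Char), pvSplitQ cs ≠ []
  | [] => by simp [pvSplitQ]
  | c :: cs => by
    simp only [pvSplitQ]
    split
    · simp
    · cases hs : pvSplitQ cs with
      | nil => exact absurd hs (pv_splitQ_ne_nil cs)
      | cons s S => simp [List.modifyHead]

lemma pv_go_spec : ∀ (fuel : Nat) (l cur : List Char) (acc : List (List Char)), l.length < fuel →
    PySem.Chars.splitOn.go ['"'] fuel l cur acc
      = (acc.reverse : List (List Char)) ++ (pvSplitQ l).modifyHead (cur.reverse ++ ·) := by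
  intro fuel
  induction fuel with
  | zero => intro l cur acc h; omega
  | succ n ih =>
    intro l cur acc h
    cases l with
    | nil => simp [PySem.Chars.splitOn.go, pvSplitQ]
    | cons ch rest =>
      by_cases hq : ch = '"'
      · subst hq
        have : PySem.Chars.splitOn.go ['"'] (n+1) ('"' :: rest) cur acc
            = PySem.Chars.splitOn.go ['"'] n rest [] (cur.reverse :: acc) := by
          simp [PySem.Chars.splitOn.go, List.isPrefixOf]
        rw [this, ih rest [] (cur.reverse :: acc) (by simp at h; omega)]
        simp only [pvSplitQ]
        cases pvSplitQ rest <;> simp [List.modifyHead]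
      · have : PySem.Chars.splitOn.go ['"'] (n+1) (ch :: rest) cur acc
            = PySem.Chars.splitOn.go ['"'] n rest (ch :: cur) acc := by
          simp [PySem.Chars.splitOn.go, List.isPrefixOf, Ne.symm hq]
        rw [this, ih rest (ch :: cur) acc (by simp at h; omega)]
        simp only [pvSplitQ, if_neg hq]
        cases hs : pvSplitQ rest with
        | nil => exact absurd hs (pv_splitQ_ne_nil rest)
        | cons s S => simp [List.modifyHead]
  



lemma pv_splitOn_eq (cs : List Char) : PySem.Chars.splitOn cs ['"'] = pvSplitQ cs := by
  rw [PySem.Chars.splitOn, pv_go_spec (cs.length + 1) cs [] [] (by omega)]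
  cases hs : pvSplitQ cs with
  | nil => exact absurd hs (pv_splitQ_ne_nil cs)
  | cons s S => simp [List.modifyHead]

lemma pv_outs_recon : ∀ (cs : List Char) (iq : Bool), pvOuts iq cs = pvRecon iq (pvSplitQ cs) := by
  intro cs
  induction cs with
  | nil => intro iq; cases iq <;> simp [pvOuts, pvSplitQ, pvRecon]
  | cons c cs ih =>
    intro iq
    by_cases hq : c = '"'
    · subst hq
      cases hs : pvSplitQ cs with
      | nil => exact absurd hs (pv_splitQ_ne_nil cs)
      | cons s S =>
        cases iq <;>
          simp [pvOuts, pvSplitQ, pvRecon, ih, hs, List.isEmpty_iff]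
    · cases hs : pvSplitQ cs with
      | nil => exact absurd hs (pv_splitQ_ne_nil cs)
      | cons s S =>
        have hb : (c == '"') = false := by simp [hq]
        cases iq <;>
          simp [pvOuts, pvSplitQ, pvRecon, ih, hs, hq, hb, List.modifyHead]

lemma pv_noquote_seg : ∀ (cs : List Char), ∀ s ∈ pvSplitQ cs, '"' ∉ s
  | [] => by simp [pvSplitQ]
  | c :: cs => by
    intro s hs
    by_cases hq : c = '"'
    · subst hq
      rw [show pvSplitQ ('"' :: cs) = [] :: pvSplitQ cs from by simp [pvSplitQ]] at hs
      rcases List.mem_cons.mp hs with rfl | hs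
      · simp
      · exact pv_noquote_seg cs s hs
    · simp only [pvSplitQ, if_neg hq] at hs
      cases h0 : pvSplitQ cs with
      | nil => exact absurd h0 (pv_splitQ_ne_nil cs)
      | cons s0 S =>
        rw [h0, List.modifyHead] at hs
        rcases List.mem_cons.mp hs with rfl | hs
        · intro hm
          rcases List.mem_cons.mp hm with h | h
          · exact hq h.symm
          · exact pv_noquote_seg cs s0 (h0 ▸ List.mem_cons_self) h
        · exact pv_noquote_seg cs s (h0 ▸ List.mem_cons_of_mem s0 hs)

lemma pv_quote_mem (cs : List Char) : ('"' ∈ pvOuts false cs) ↔ 1 < (pvSplitQ cs).length := by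
  rw [pv_outs_recon cs false]
  cases hs : pvSplitQ cs with
  | nil => exact absurd hs (pv_splitQ_ne_nil cs)
  | cons s S =>
    have hns : '"' ∉ s := pv_noquote_seg cs s (hs ▸ List.mem_cons_self)
    cases S with
    | nil => simp [pvRecon, hns]
    | cons t T => simp [pvRecon, List.isEmpty_iff]

lemma pv_mem_recon (a : Char) (ha : a ≠ '"') : ∀ (S : List (List Char)) (iq : Bool),
    a ∈ pvRecon iq S ↔ a ∈ (pvAltern (!iq) S).flatten := by
  intro S
  induction S with
  | nil => intro iq; simp [pvRecon, pvAltern]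
  | cons s rest ih =>
    intro iq
    cases rest with
    | nil => cases iq <;> simp [pvRecon, pvAltern]
    | cons t T =>
      cases iq with
      | false =>
        rw [show pvRecon false (s :: t :: T) = s ++ '"' :: pvRecon true (t :: T) from by
              simp [pvRecon, List.isEmpty_iff],
            show pvAltern (!false) (s :: t :: T) = s :: pvAltern false (t :: T) from by
              simp [pvAltern]]
        simp only [List.flatten_cons, List.mem_append, List.mem_cons]
        have := ih true
        simp only [Bool.not_true] at this
        simp [this, ha]
      | true =>
        rw [show pvRecon true (s :: t :: T) = pvRecon false (t :: T) from by
              simp [pvRecon, List.isEmpty_iff],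
            show pvAltern (!true) (s :: t :: T) = pvAltern true (t :: T) from by
              simp [pvAltern]]
        simpa using ih false

lemma pv_filterMap_aux {X : Type} :
    ∀ (m : Nat) (xs : List X), xs.length ≤ m →
      List.filterMap (fun k : Nat => xs[2 * k]?) (List.range ((xs.length + 1) / 2))
        = pvAltern true xs := by
  intro m
  induction m with
  | zero =>
    intro xs h
    have : xs = [] := List.eq_nil_of_length_eq_zero (by omega)
    subst this; simp [pvAltern]
  | succ n ih =>
    intro xs h
    match xs with
    | [] => simp [pvAltern]
    | [a] => simp [pvAltern, List.range_succ]
    | a :: b :: t =>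
      have hlen : (a :: b :: t).length = t.length + 2 := by simp
      have hcount : ((a :: b :: t).length + 1) / 2 = (t.length + 1) / 2 + 1 := by
        simp; omega
      rw [hcount, List.range_succ_eq_map, List.filterMap_cons, List.filterMap_map]
      have hf : ∀ k : Nat, ((fun k : Nat => (a :: b :: t)[2 * k]?) ∘ Nat.succ) k
          = (fun k : Nat => t[2 * k]?) k := by
        intro k
        simp only [Function.comp]
        rw [show 2 * Nat.succ k = 2 * k + 1 + 1 by omega]
        simp
      rw [List.filterMap_congr (fun k _ => hf k)]
      rw [ih t (by simpa using Nat.le_of_succ_le_succ (by omega))]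
      simp [pvAltern]

lemma pv_slice2 {X : Type} (xs : List X) :
    PySem.List.slice? xs (some 0) none 2 = some (pvAltern true xs) := by
  rw [PySem.List.slice?]
  simp only [PySem.List.sliceIndices]
  norm_num
  have hc : (if 0 < xs.length then (((xs.length : Int) + 2 - 1) / 2).toNat else 0)
      = (xs.length + 1) / 2 := by
    split_ifs <;> omega
  rw [hc]
  have hi : ∀ k : Nat, (fun x : Nat => xs[(2 * (x : Int)).toNat]?) k
      = (fun k : Nat => xs[2 * k]?) k := by
    intro k
    simp only []
    have : ((2 * (k : Int))).toNat = 2 * k := by omega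
    rw [this]
  rw [List.filterMap_congr (fun k _ => hi k)]
  exact pv_filterMap_aux xs.length xs le_rfl

lemma pv_isIn_single (a : Char) (p : List Char) : PySem.Chars.isIn [a] p = decide (a ∈ p) := by
  by_cases hm : a ∈ p
  · simp only [hm, decide_true]
    rw [PySem.Chars.isIn_iff_infix]
    exact (List.singleton_infix_iff a p).mpr hm
  · simp only [hm, decide_false]
    rw [PySem.Chars.isIn_eq_false_iff, List.singleton_infix_iff]
    exact hm

-- ===== VERDICT (by name: the statement is the Claim_ definition above) =====
theorem quote_check_spec : Claim_equal_quote_check := by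
  intro line c _
  unfold Spec_quote_check
  unfold quote_check quote_check_alt
  rw [pv_foldA c line.toList false false]
  simp only [Bool.false_or]
  rcases hcl : c.toList with _ | ⟨a, _ | ⟨b, tl⟩⟩
  · rw [if_pos (by simp [hcl])]
    simp
  · have hlen : PySem.Str.len c = 1 := by simp [PySem.Str.len, hcl]
    rw [if_neg (by simp [hcl])]
    have hany : ∀ l : List Char, (l.any fun ch => [a] == [ch]) = decide (a ∈ l) := by
      intro l
      rw [Bool.eq_iff_iff]
      simp only [List.any_eq_true, decide_eq_true_eq]
      constructor
      · rintro ⟨x, hx, he⟩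
        simp only [List.cons.injEq, beq_iff_eq, and_true] at he
        exact he ▸ hx
      · intro h; exact ⟨a, h, by simp⟩
    rw [hany]
    by_cases hA : a = '"'
    · subst hA
      have hbeq : (c == "\"") = true := by
        simp only [beq_iff_eq]
        exact String.toList_inj.mp (by simp [hcl])
      rw [if_pos hbeq]
      rw [pv_splitOn_eq]
      rw [Bool.eq_iff_iff]
      simp only [decide_eq_true_eq]
      exact pv_quote_mem line.toList
    · have hbeq : ¬ ((c == "\"") = true) := by
        simp only [beq_iff_eq]
        intro he
        apply hA
        have := congrArg String.toList he
        simp [hcl] at this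
        exact this
      rw [if_neg hbeq]
      rw [pv_splitOn_eq, pv_slice2]
      simp only [Option.getD_some]
      simp only [pv_isIn_single]
      rw [Bool.eq_iff_iff]
      simp only [decide_eq_true_eq, List.any_eq_true]
      rw [pv_outs_recon line.toList false, pv_mem_recon a hA (pvSplitQ line.toList) false]
      simp [List.mem_flatten]
  · rw [if_pos (by simp [PySem.Str.len, hcl]; omega)]
    simp
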